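-- pv_equiv track=rewrite | github.com/M-Taghizadeh/python-webinar | 13-generator/13-generator.py | get_even
-- ===== SOURCE A (Python) =====
-- def get_even(n):
--     num = 0
--     evens = []
--     while(num<n):
--         if num % 2 == 0:
--             evens.append(num)
--         num = num + 1
--     return evens
-- ===== SOURCE B (Python) =====
-- def get_even(n):
--     return [2 * i for i in range((n + 1) // 2)]
-- ===== Notes on version B (the rewrite author's own statement) =====
-- stated objective: faster
-- what changed: B computes the count of evens below n in closed form and generates them directly by doubling each index, instead of scanning every integer below n and testing parity.
import Mathlib
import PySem

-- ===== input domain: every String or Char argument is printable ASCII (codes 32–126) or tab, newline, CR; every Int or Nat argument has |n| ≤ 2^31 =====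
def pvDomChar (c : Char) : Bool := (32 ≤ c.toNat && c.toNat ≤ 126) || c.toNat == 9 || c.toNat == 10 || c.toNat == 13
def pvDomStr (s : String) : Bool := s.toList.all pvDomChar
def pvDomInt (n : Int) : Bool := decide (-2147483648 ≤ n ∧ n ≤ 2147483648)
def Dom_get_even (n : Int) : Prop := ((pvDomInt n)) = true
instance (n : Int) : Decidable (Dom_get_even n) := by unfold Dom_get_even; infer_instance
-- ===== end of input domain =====

-- B replaces A's scan-all-and-filter loop by generating the (n+1)//2 evens directly as doubled indices (constant-factor faster; exact same list).

-- ===== PORT A =====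
-- while(num<n): if num % 2 == 0: evens.append(num); num += 1
def getEvenLoop (num n : Int) (evens : List Int) : List Int :=
  if num < n then
    getEvenLoop (num + 1) n (if PySem.Int.mod num 2 = 0 then evens ++ [num] else evens)
  else evens
termination_by (n - num).toNat
decreasing_by omega

def get_even (n : Int) : List Int := getEvenLoop 0 n []

-- ===== PORT B =====
-- [2 * i for i in range((n + 1) // 2)]
def get_even_alt (n : Int) : List Int :=
  (PySem.List.pyRange 0 (PySem.Int.floordiv (n + 1) 2) 1).map (fun i => 2 * i)

-- ===== PRECONDITION & SPEC =====
def Spec_get_even (n : Int) (out : List Int) : Prop := out = get_even_alt n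
instance (n : Int) (out : List Int) : Decidable (Spec_get_even n out) := by unfold Spec_get_even; infer_instance

-- ===== CLAIM (what is proved, stated in full; the proofs are below) =====
def Claim_equal_get_even : Prop := ∀ (n : Int), Dom_get_even n → Spec_get_even n (get_even n)

-- ===== LEMMAS AND PROOFS =====

theorem loop_step (num n : Int) (evens : List Int) (h : num < n) :
    getEvenLoop num n evens =
      getEvenLoop (num + 1) n
        (if PySem.Int.mod num 2 = 0 then evens ++ [num] else evens) := by
  rw [getEvenLoop, if_pos h]

theorem loop_stop (num n : Int) (evens : List Int) (h : ¬ num < n) :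
    getEvenLoop num n evens = evens := by
  rw [getEvenLoop, if_neg h]

theorem getEvenLoop_acc (k : Nat) (num n : Int) (evens : List Int)
    (hk : (n - num).toNat ≤ k) :
    getEvenLoop num n evens = evens ++ getEvenLoop num n [] := by
  induction k generalizing num evens with
  | zero =>
    rw [loop_stop _ _ _ (by omega), loop_stop _ _ _ (by omega)]; simp
  | succ k ih =>
    by_cases h : num < n
    · rw [loop_step _ _ _ h, loop_step _ _ ([]) h]
      split_ifs with hp
      · rw [ih (num + 1) (evens ++ [num]) (by omega),
            ih (num + 1) ([] ++ [num]) (by omega)]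
        simp
      · rw [ih (num + 1) evens (by omega)]
    · rw [loop_stop _ _ _ h, loop_stop _ _ _ h]; simp

theorem getEvenLoop_succ (k : Nat) (num n : Int) (h : num ≤ n)
    (hk : (n - num).toNat ≤ k) :
    getEvenLoop num (n + 1) [] =
      getEvenLoop num n [] ++ (if PySem.Int.mod n 2 = 0 then [n] else []) := by
  induction k generalizing num with
  | zero =>
    have hn : n = num := by omega
    subst hn
    rw [loop_step _ _ _ (by omega), loop_stop _ _ _ (by omega),
        loop_stop n n [] (by omega)]
    split_ifs <;> simp
  | succ k ih =>
    by_cases hlt : num < n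
    · rw [loop_step _ _ _ (by omega),
          getEvenLoop_acc (k + 1) (num + 1) (n + 1) _ (by omega),
          ih (num + 1) (by omega) (by omega),
          loop_step num n [] hlt]
      split_ifs <;>
        first
          | (rw [getEvenLoop_acc (k + 1) (num + 1) n ([] ++ [num]) (by omega)]
             simp)
          | simp
    · have hn : n = num := by omega
      subst hn
      rw [loop_step _ _ _ (by omega), loop_stop _ _ _ (by omega),
          loop_stop n n [] (by omega)]
      split_ifs <;> simp

theorem get_even_eq_alt (n : Int) : get_even n = get_even_alt n := by
  by_cases h : n ≤ 0
  · rw [get_even, loop_stop _ _ _ (by omega), get_even_alt,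
        PySem.List.pyRange_one_eq_nil]
    · simp
    · rw [PySem.Int.floordiv_eq_ediv_of_pos (by omega)]; omega
  · obtain ⟨m, hm⟩ : ∃ m : Nat, n = (m : Int) := ⟨n.toNat, by omega⟩
    subst hm
    clear h
    induction m with
    | zero =>
      rw [get_even, loop_stop _ _ _ (by omega)]
      simp [get_even_alt, PySem.Int.floordiv]
    | succ m ih =>
      rw [get_even, show ((m + 1 : Nat) : Int) = (m : Int) + 1 by push_cast; ring,
          getEvenLoop_succ m 0 (m : Int) (by omega) (by omega)]
      rw [show getEvenLoop 0 (m : Int) [] = get_even (m : Int) from rfl, ih]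
      rw [get_even_alt, get_even_alt]
      rw [PySem.Int.floordiv_eq_ediv_of_pos (show (0:Int) < 2 by omega),
          PySem.Int.floordiv_eq_ediv_of_pos (show (0:Int) < 2 by omega),
          PySem.Int.mod_eq_emod_of_pos (show (0:Int) < 2 by omega)]
      rcases Nat.even_or_odd m with ⟨j, hj⟩ | ⟨j, hj⟩
      · have hfd1 : ((m : Int) + 1) / 2 = j := by omega
        have hfd2 : ((m : Int) + 1 + 1) / 2 = j + 1 := by omega
        have hmod : (m : Int) % 2 = 0 := by omega
        rw [hfd1, hfd2, hmod, if_pos rfl,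
            PySem.List.pyRange_one_succ_right (by omega)]
        simp; omega
      · have hfd1 : ((m : Int) + 1) / 2 = j + 1 := by omega
        have hfd2 : ((m : Int) + 1 + 1) / 2 = j + 1 := by omega
        have hmod : ¬ (m : Int) % 2 = 0 := by omega
        rw [hfd1, hfd2, if_neg hmod]
        simp

-- ===== VERDICT (by name: the statement is the Claim_ definition above) =====
theorem get_even_spec : Claim_equal_get_even := by
  intro n _
  exact get_even_eq_alt n
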